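-- pv_equiv track=rewrite | github.com/icyaaaww/N.E.K.O | utils/audio.py | select_voice_clone_sample_rate
-- ===== SOURCE A (Python) =====
-- def select_voice_clone_sample_rate(sample_rate: int) -> int:
--     """为语音克隆参考音频选择允许的目标采样率。
--
--     阿里云 DashScope VoiceEnrollmentService 要求采样率至少为 16kHz。
--     规则：
--     1. 如果原采样率 >= 48000Hz，向下匹配到 48000Hz
--     2. 如果原采样率在 44100-47999Hz 之间，向下匹配到 44100Hz
--     3. 如果原采样率在 22050-44099Hz 之间，向下匹配到 22050Hz
--     4. 如果原采样率在 16000-22049Hz 之间，向下匹配到 16000Hz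
--     5. 如果原采样率 < 16000Hz，抛出错误（API最低要求16kHz）
--
--     例如：32000 -> 22050，47000 -> 44100，96000 -> 48000。
--     低于16kHz的文件会被拒绝，需要用户自行提供符合要求的音频。
--     """
--     if sample_rate < 16000:
--         raise ValueError(
--             f"采样率过低: {sample_rate}Hz。"
--             f"阿里云语音克隆API要求参考音频采样率至少为16kHz，"
--             f"请提供16kHz、22.05kHz、44.1kHz或48kHz的音频文件。"
--         )
--
--     allowed_sample_rates = [16000, 22050, 44100, 48000]
--     for allowed_rate in reversed(allowed_sample_rates):
--         if sample_rate >= allowed_rate: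
--             return allowed_rate
--     return 16000  # 保底，理论上不会走到这里
-- ===== SOURCE B (Python) =====
-- import bisect
--
-- _ALLOWED_SAMPLE_RATES = [16000, 22050, 44100, 48000]
--
-- def select_voice_clone_sample_rate(sample_rate: int) -> int:
--     if sample_rate < 16000:
--         raise ValueError(
--             f"采样率过低: {sample_rate}Hz。"
--             f"阿里云语音克隆API要求参考音频采样率至少为16kHz，"
--             f"请提供16kHz、22.05kHz、44.1kHz或48kHz的音频文件。"
--         )
--     idx = bisect.bisect_right(_ALLOWED_SAMPLE_RATES, sample_rate)
--     return _ALLOWED_SAMPLE_RATES[idx - 1]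
-- ===== Notes on version B (the rewrite author's own statement) =====
-- stated objective: idiomatic
-- what changed: Replaces the explicit reverse linear scan over the allowed rates with a bisect_right binary-search index into the sorted threshold list.
import Mathlib
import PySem

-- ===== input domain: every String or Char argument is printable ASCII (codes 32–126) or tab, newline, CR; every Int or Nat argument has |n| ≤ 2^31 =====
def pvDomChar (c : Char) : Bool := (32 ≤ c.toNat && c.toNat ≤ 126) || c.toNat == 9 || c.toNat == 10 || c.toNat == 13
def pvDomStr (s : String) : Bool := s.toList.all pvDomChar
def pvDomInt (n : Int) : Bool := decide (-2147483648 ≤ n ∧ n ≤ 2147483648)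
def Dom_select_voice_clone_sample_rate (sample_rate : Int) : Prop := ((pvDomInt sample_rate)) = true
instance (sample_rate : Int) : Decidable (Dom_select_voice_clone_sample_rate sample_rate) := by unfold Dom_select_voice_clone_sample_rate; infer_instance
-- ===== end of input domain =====

-- B replaces A's reverse linear scan over the allowed rates with a bisect_right
-- binary search into the sorted threshold list (idiomatic; same result).
-- ===== PORT A =====
-- the 'for allowed_rate in reversed(allowed_sample_rates): if sample_rate >= allowed_rate: return allowed_rate' loop
def pvScanA : List Int → Int → Int
  | [], _ => 16000          -- the '保底' fallback return
  | r :: rs, sr => if sr ≥ r then r else pvScanA rs sr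

def select_voice_clone_sample_rate (sample_rate : Int) : Int :=
  if sample_rate < 16000 then 0   -- Python raises ValueError here; excluded by Pre_
  else pvScanA ([16000, 22050, 44100, 48000].reverse) sample_rate

-- ===== PORT B =====
-- bisect.bisect_right: while lo < hi: mid = (lo+hi)//2; if x < a[mid]: hi = mid else lo = mid+1
-- (fuel = hi - lo bounds the loop iterations; fuel ≥ hi suffices, each step shrinks hi - lo)
def pvBisectRight (a : List Int) (x : Int) : Nat → Nat → Nat → Nat
  | 0, lo, _ => lo
  | fuel + 1, lo, hi =>
    if lo < hi then
      let mid := (lo + hi) / 2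
      if x < a.getD mid 0 then pvBisectRight a x fuel lo mid
      else pvBisectRight a x fuel (mid + 1) hi
    else lo

def select_voice_clone_sample_rate_alt (sample_rate : Int) : Int :=
  if sample_rate < 16000 then 0   -- Python raises ValueError here; excluded by Pre_
  else
    let allowed : List Int := [16000, 22050, 44100, 48000]
    let idx := pvBisectRight allowed sample_rate allowed.length 0 allowed.length
    allowed.getD (idx - 1) 0

-- ===== PRECONDITION & SPEC =====
-- Pre_ excludes sample rates below the 16 kHz minimum, where the Python A raises ValueError.
def Pre_select_voice_clone_sample_rate (sample_rate : Int) : Prop := 16000 ≤ sample_rate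
instance (sample_rate : Int) : Decidable (Pre_select_voice_clone_sample_rate sample_rate) := by unfold Pre_select_voice_clone_sample_rate; infer_instance
def pvWitness_select_voice_clone_sample_rate : Int := 32000

def Spec_select_voice_clone_sample_rate (sample_rate : Int) (out : Int) : Prop := out = select_voice_clone_sample_rate_alt sample_rate
instance (sample_rate : Int) (out : Int) : Decidable (Spec_select_voice_clone_sample_rate sample_rate out) := by unfold Spec_select_voice_clone_sample_rate; infer_instance

-- ===== CLAIM (what is proved, stated in full; the proofs are below) =====
def Claim_equal_select_voice_clone_sample_rate : Prop := ∀ (sample_rate : Int), Dom_select_voice_clone_sample_rate sample_rate → Pre_select_voice_clone_sample_rate sample_rate → Spec_select_voice_clone_sample_rate sample_rate (select_voice_clone_sample_rate sample_rate)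

-- ===== LEMMAS AND PROOFS =====
theorem pvBisectRight_eval (sr : Int) :
    pvBisectRight [16000, 22050, 44100, 48000] sr 4 0 4 =
    if sr < 16000 then 0 else if sr < 22050 then 1 else if sr < 44100 then 2
    else if sr < 48000 then 3 else 4 := by
  simp only [pvBisectRight]
  norm_num
  split_ifs <;> omega

-- ===== VERDICT (by name: the statement is the Claim_ definition above) =====
theorem select_voice_clone_sample_rate_spec : Claim_equal_select_voice_clone_sample_rate := by
  intro sr _ hp
  unfold Pre_select_voice_clone_sample_rate at hp
  unfold Spec_select_voice_clone_sample_rate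
  unfold select_voice_clone_sample_rate select_voice_clone_sample_rate_alt
  simp only [List.length_cons, List.length_nil]
  norm_num
  rw [pvBisectRight_eval]
  norm_num [pvScanA]
  split_ifs <;> simp <;> omega
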